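-- pv_equiv track=rewrite | github.com/ustcgaswin/cobol-dotnet-server | app/core/parsers/copybook_parser.py | _has_terminating_period
-- ===== SOURCE A (Python) =====
-- def _has_terminating_period(text: str) -> bool:
--     """Check if text ends with a terminating period (not inside quotes)"""
--     in_quote = False
--     quote_char = None
--
--     for i, char in enumerate(text):
--         if char in ("'", '"') and (i == 0 or text[i-1] != '\\'):
--             if not in_quote:
--                 in_quote = True
--                 quote_char = char
--             elif char == quote_char:
--                 in_quote = False
--                 quote_char = None
--         elif char == '.' and not in_quote:
--             # Check if this is end of statement (not decimal point in PIC)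
--             remaining = text[i+1:].strip()
--             if not remaining or remaining[0].isupper() or remaining[0].isdigit():
--                 return True
--
--     # Check if last non-whitespace char is period
--     stripped = text.rstrip()
--     return stripped and stripped[-1] == '.'
-- ===== SOURCE B (Python) =====
-- def _has_terminating_period(text: str) -> bool:
--     n = len(text)
--     # one backward pass: nxt[i] = first non-whitespace character at index >= i (None if none)
--     nxt = [None] * (n + 1)
--     for i in range(n - 1, -1, -1):
--         nxt[i] = nxt[i + 1] if text[i].isspace() else text[i]
--     quote = None
--     last = None  # last non-whitespace character seen so far
--     for i, ch in enumerate(text):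
--         if ch in "'\"" and (i == 0 or text[i - 1] != '\\'):
--             if quote is None:
--                 quote = ch
--             elif ch == quote:
--                 quote = None
--         elif ch == '.' and quote is None:
--             nx = nxt[i + 1]
--             if nx is None or nx.isupper() or nx.isdigit():
--                 return True
--         if not ch.isspace():
--             last = ch
--     return last == '.'
-- ===== Notes on version B (the rewrite author's own statement) =====
-- stated objective: alternative
-- what changed: Replaces the per-period text[i+1:].strip() rescans with a single backward pass precomputing the next non-whitespace character for every index, and tracks the last non-whitespace character during the forward scan instead of a final rstrip.
-- outside the precondition, e.g. on _has_terminating_period('  '): A returns '', B returns False; on _has_terminating_period(''): A returns '', B returns False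
import Mathlib
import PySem

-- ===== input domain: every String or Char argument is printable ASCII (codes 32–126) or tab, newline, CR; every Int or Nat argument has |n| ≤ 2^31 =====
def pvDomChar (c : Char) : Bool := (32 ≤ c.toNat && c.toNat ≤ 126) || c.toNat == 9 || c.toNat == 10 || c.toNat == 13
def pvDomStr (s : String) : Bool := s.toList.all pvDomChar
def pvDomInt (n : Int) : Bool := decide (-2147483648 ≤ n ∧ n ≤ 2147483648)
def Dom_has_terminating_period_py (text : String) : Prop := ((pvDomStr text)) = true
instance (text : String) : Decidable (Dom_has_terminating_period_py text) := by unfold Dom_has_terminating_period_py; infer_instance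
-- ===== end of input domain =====

-- B replaces A's per-period `text[i+1:].strip()` rescans with one backward pass
-- precomputing the next non-whitespace character per index and an in-loop tracker
-- of the last non-whitespace character; objective: alternative single-pass algorithm.


-- ===== PORT A =====
-- A's for-loop: returns true iff some iteration hits `return True`; `prev` is text[i-1]
-- (none at i = 0), so `i == 0 or text[i-1] != '\\'` is `prev ≠ some '\\'`.
def pvLoopA : List Char → Option Char → Bool → Option Char → Bool
  | [], _, _, _ => false
  | c :: rest, prev, in_quote, quote_char =>
    if (c = '\'' ∨ c = '"') ∧ prev ≠ some '\\' then
      if !in_quote then pvLoopA rest (some c) true (some c)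
      else if some c = quote_char then pvLoopA rest (some c) false none
      else pvLoopA rest (some c) in_quote quote_char
    else if c = '.' ∧ !in_quote then
      -- remaining = text[i+1:].strip(); remaining[0] only read when remaining nonempty
      let remaining := PySem.Chars.strip rest
      if remaining = [] ∨ PySem.Chars.isupper (remaining.headD ' ') ∨
          PySem.Chars.isdigit (remaining.headD ' ') then true
      else pvLoopA rest (some c) in_quote quote_char
    else pvLoopA rest (some c) in_quote quote_char

-- final `return stripped and stripped[-1] == '.'`; on stripped == '' Python A returns
-- the non-bool '' — excluded by Pre_ below, the port returns false there.
def has_terminating_period_py (text : String) : Bool :=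
  if pvLoopA text.toList none false none then true
  else
    let stripped := PySem.Chars.rstrip text.toList
    if stripped = [] then false else PySem.List.pyGet? stripped (-1) == some '.'

-- ===== PORT B =====
-- backward pass of Source B: nxt[i] = first non-whitespace char at index ≥ i; list of length n+1
def pvBuildNxt : List Char → List (Option Char)
  | [] => [none]
  | c :: rest =>
    let r := pvBuildNxt rest
    (if PySem.Chars.isspace c then r.headD none else some c) :: r

-- forward scan of Source B: quote state, nxt lookups, last non-whitespace tracker
def pvLoopB : List Char → Option Char → Option Char → Option Char → List (Option Char) → Bool
  | [], _, _, last, _ => last == some '.'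
  | c :: rest, prev, quote, last, nxts =>
    let nxts' := nxts.tail
    let last' := if PySem.Chars.isspace c then last else some c
    if (c = '\'' ∨ c = '"') ∧ prev ≠ some '\\' then
      let quote' := match quote with
        | none => some c
        | some q => if c = q then none else some q
      pvLoopB rest (some c) quote' last' nxts'
    else if c = '.' ∧ quote = none then
      match nxts'.headD none with
      | none => true
      | some nx =>
        if PySem.Chars.isupper nx || PySem.Chars.isdigit nx then true
        else pvLoopB rest (some c) quote last' nxts'
    else pvLoopB rest (some c) quote last' nxts'

def has_terminating_period_py_alt (text : String) : Bool :=
  pvLoopB text.toList none none none (pvBuildNxt text.toList)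

-- ===== PRECONDITION & SPEC =====
-- Pre_ excludes texts with no non-whitespace character: there Python A falls through to
-- `return stripped and …` with stripped == '' and returns the non-bool '' instead of False.
def Pre_has_terminating_period_py (text : String) : Prop :=
  (text.toList.any (fun c => !PySem.Chars.isspace c)) = true
instance (text : String) : Decidable (Pre_has_terminating_period_py text) := by
  unfold Pre_has_terminating_period_py; infer_instance

def pvWitness_has_terminating_period_py : String := "MOVE 1 TO X."

def Spec_has_terminating_period_py (text : String) (out : Bool) : Prop :=
  out = has_terminating_period_py_alt text
instance (text : String) (out : Bool) : Decidable (Spec_has_terminating_period_py text out) := by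
  unfold Spec_has_terminating_period_py; infer_instance

-- ===== CLAIM (what is proved, stated in full; the proofs are below) =====
def Claim_equal_has_terminating_period_py : Prop :=
  ∀ (text : String), Dom_has_terminating_period_py text →
    Pre_has_terminating_period_py text →
    Spec_has_terminating_period_py text (has_terminating_period_py text)

-- ===== LEMMAS AND PROOFS =====

-- head of the precomputed nxt list = head of lstrip
theorem pvBuildNxt_headD (l : List Char) :
    (pvBuildNxt l).headD none = (PySem.Chars.lstrip l).head? := by
  induction l with
  | nil => simp [pvBuildNxt, PySem.Chars.lstrip]
  | cons c rest ih =>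
    unfold PySem.Chars.lstrip at ih ⊢
    by_cases h : PySem.Chars.isspace c = true <;>
      simp [pvBuildNxt, List.dropWhile_cons, h, ← List.headD_eq_head?_getD, ih]

-- rstrip of a cons
theorem pvRstrip_cons (c : Char) (xs : List Char) :
    PySem.Chars.rstrip (c :: xs) =
      if PySem.Chars.rstrip xs = [] then
        (if PySem.Chars.isspace c then [] else [c])
      else c :: PySem.Chars.rstrip xs := by
  simp only [PySem.Chars.rstrip, List.reverse_cons, List.dropWhile_append]
  by_cases h : List.dropWhile PySem.Chars.isspace xs.reverse = []
  · by_cases hc : PySem.Chars.isspace c = true <;>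
      simp [h, List.dropWhile_cons, hc]
  · simp [h]

-- if the head is non-space (or the list empty), rstrip keeps the head
theorem pvRstrip_head? (m : List Char)
    (h : ∀ x, m.head? = some x → PySem.Chars.isspace x = false) :
    (PySem.Chars.rstrip m).head? = m.head? := by
  cases m with
  | nil => simp [PySem.Chars.rstrip]
  | cons x xs =>
    have hx := h x (by simp)
    rw [pvRstrip_cons]
    by_cases he : PySem.Chars.rstrip xs = [] <;> simp [he, hx]

-- head of strip = head of lstrip
theorem pvStrip_head? (l : List Char) :
    (PySem.Chars.strip l).head? = (PySem.Chars.lstrip l).head? := by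
  apply pvRstrip_head?
  intro x hx
  unfold PySem.Chars.lstrip at hx
  cases hdw : List.dropWhile PySem.Chars.isspace l with
  | nil => simp [hdw] at hx
  | cons y ys =>
    have hy := List.head?_dropWhile_not PySem.Chars.isspace l
    rw [hdw] at hx hy
    simp at hx hy
    rw [← hx]
    simpa using hy

-- the last-nonspace accumulator over a list
def pvUpdLast (last : Option Char) (l : List Char) : Option Char :=
  l.foldl (fun a c => if PySem.Chars.isspace c then a else some c) last

theorem pvUpdLast_eq (l : List Char) (last : Option Char) :
    pvUpdLast last l =
      if PySem.Chars.rstrip l = [] then last else (PySem.Chars.rstrip l).getLast? := by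
  induction l generalizing last with
  | nil => simp [pvUpdLast, PySem.Chars.rstrip]
  | cons c xs ih =>
    have step : pvUpdLast last (c :: xs) =
        pvUpdLast (if PySem.Chars.isspace c then last else some c) xs := by
      simp [pvUpdLast]
    rw [step, ih, pvRstrip_cons]
    by_cases he : PySem.Chars.rstrip xs = []
    · by_cases hc : PySem.Chars.isspace c = true <;> simp [he, hc]
    · cases hm : PySem.Chars.rstrip xs with
      | nil => exact absurd hm he
      | cons a t => simp [List.getLast?_cons_cons]

-- A's period condition characterised by B's next-non-whitespace lookup
theorem pvPeriodCond (rest : List Char) :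
    (PySem.Chars.strip rest = [] ∨
       PySem.Chars.isupper ((PySem.Chars.strip rest).headD ' ') = true ∨
       PySem.Chars.isdigit ((PySem.Chars.strip rest).headD ' ') = true)
    ↔ ((pvBuildNxt rest).headD none = none ∨
       ∃ nx, (pvBuildNxt rest).headD none = some nx ∧
         (PySem.Chars.isupper nx || PySem.Chars.isdigit nx) = true) := by
  rw [pvBuildNxt_headD, ← pvStrip_head?]
  cases hst : PySem.Chars.strip rest with
  | nil => simp
  | cons y ys => simp

-- main loop invariant: B's loop = A's loop OR the tracked-last check,
-- with A's (in_quote, quote_char) pair mirrored by B's single option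
theorem pvLoop_eq (l : List Char) (prev : Option Char) (q : Option Char) (last : Option Char) :
    pvLoopB l prev q last (pvBuildNxt l) =
      (pvLoopA l prev q.isSome q || (pvUpdLast last l == some '.')) := by
  induction l generalizing prev q last with
  | nil => simp [pvLoopA, pvLoopB, pvUpdLast]
  | cons c rest ih =>
    have htail : (pvBuildNxt (c :: rest)).tail = pvBuildNxt rest := by
      simp [pvBuildNxt]
    have hupd : pvUpdLast last (c :: rest) =
        pvUpdLast (if PySem.Chars.isspace c then last else some c) rest := by
      simp [pvUpdLast]
    simp only [pvLoopA, pvLoopB, htail, hupd]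
    by_cases hq : (c = '\'' ∨ c = '"') ∧ prev ≠ some '\\'
    · simp only [if_pos hq]
      cases q with
      | none => simpa using ih (some c) (some c) _
      | some qc =>
        by_cases hc : c = qc
        · have h1 : (some c = some qc) := by simp [hc]
          simp only [hc]
          simpa using ih (some qc) none _
        · have h1 : ¬ (some c = some qc) := by simpa using hc
          simp only [if_neg h1, hc, if_false]
          simpa [hc] using ih (some c) (some qc) _
    · simp only [if_neg hq]
      cases q with
      | some qc =>
        have h2 : ¬ (c = '.' ∧ ((some qc : Option Char) = none)) := by simp
        have h3 : ¬ (c = '.' ∧ !(some qc : Option Char).isSome) := by simp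
        simp only [if_neg h2, if_neg h3]
        simpa using ih (some c) (some qc) _
      | none =>
        by_cases hc : c = '.'
        · subst hc
          have h2 : ('.' = '.' ∧ ((none : Option Char) = none)) := ⟨rfl, rfl⟩
          have h3 : ('.' = '.' ∧ !(none : Option Char).isSome) := by simp
          simp only []
          rcases hnx : (pvBuildNxt rest).headD none with _ | nx
          · have hcnd := (pvPeriodCond rest).mpr (Or.inl hnx)
            simp only [if_pos hcnd]
            simp
          · by_cases hud : (PySem.Chars.isupper nx || PySem.Chars.isdigit nx) = true
            · have hcnd := (pvPeriodCond rest).mpr (Or.inr ⟨nx, hnx, hud⟩)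
              simp only [if_pos hcnd]
              simp [hud]
            · have hcnd : ¬ (PySem.Chars.strip rest = [] ∨
                  PySem.Chars.isupper ((PySem.Chars.strip rest).headD ' ') = true ∨
                  PySem.Chars.isdigit ((PySem.Chars.strip rest).headD ' ') = true) := by
                intro hyes
                rcases (pvPeriodCond rest).mp hyes with h | ⟨nx', hnx', hud'⟩
                · rw [hnx] at h; simp at h
                · rw [hnx] at hnx'
                  cases hnx'
                  exact hud hud'
              simp only [if_neg hcnd, hud, if_false, Bool.false_eq_true]
              simpa using ih (some '.') none _
        · have h2 : ¬ (c = '.' ∧ ((none : Option Char) = none)) := fun h => hc h.1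
          have h3 : ¬ (c = '.' ∧ !(none : Option Char).isSome) := fun h => hc h.1
          simp only [hc]
          simpa using ih (some c) none _

-- ===== VERDICT (by name: the statement is the Claim_ definition above) =====
theorem has_terminating_period_py_spec : Claim_equal_has_terminating_period_py := by
  intro text _ _
  unfold Spec_has_terminating_period_py
  unfold has_terminating_period_py has_terminating_period_py_alt
  have h := pvLoop_eq text.toList none none none
  simp only [Option.isSome_none] at h
  rw [h]
  by_cases hA : pvLoopA text.toList none false none = true
  · simp [hA]
  · simp only [Bool.not_eq_true] at hA
    simp only [hA, Bool.false_or]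
    rw [pvUpdLast_eq]
    by_cases he : PySem.Chars.rstrip text.toList = []
    · simp [he]
    · simp [he, PySem.List.pyGet?_neg_one]
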